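-- pv_equiv track=rewrite | github.com/quarter26/ctf_crypto_tools | cipher_01248.py | cipher01248
-- ===== SOURCE A (Python) =====
-- def cipher01248(ciphertext):
--     ''' 01248 cipher '''
--
--     # Split ciphertext with 0, return a list
--     ciphertext = ciphertext.split("0")
--
--     # define a void message
--     plaintext = ""  # 定义一个空的明文
--
--     # Since every element is a letter
--     for i in range(0, len(ciphertext)):
--         sub_sum = 0
--         # For every digit of element in c(every element is str type)
--         for j in range(0, len(ciphertext[i])):
--             # Sum up all digits in sub-element
--             sub_sum += int(ciphertext[i][j])
--         # ASCII convert.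
--         plaintext += chr(sub_sum + 64)
--     return plaintext
-- ===== SOURCE B (Python) =====
-- def cipher01248(ciphertext):
--     ''' 01248 cipher: one pass, running group sum '''
--     plaintext = ""
--     sub_sum = 0
--     for char in ciphertext:
--         if char == "0":
--             plaintext += chr(sub_sum + 64)
--             sub_sum = 0
--         else:
--             sub_sum += int(char)
--     return plaintext + chr(sub_sum + 64)
-- ===== Notes on version B (the rewrite author's own statement) =====
-- stated objective: simpler
-- what changed: Replaces split('0') plus two nested index loops over the group list with a single pass over the characters that keeps a running group sum, emitting a letter at each '0' and once after the loop.
import Mathlib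
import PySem

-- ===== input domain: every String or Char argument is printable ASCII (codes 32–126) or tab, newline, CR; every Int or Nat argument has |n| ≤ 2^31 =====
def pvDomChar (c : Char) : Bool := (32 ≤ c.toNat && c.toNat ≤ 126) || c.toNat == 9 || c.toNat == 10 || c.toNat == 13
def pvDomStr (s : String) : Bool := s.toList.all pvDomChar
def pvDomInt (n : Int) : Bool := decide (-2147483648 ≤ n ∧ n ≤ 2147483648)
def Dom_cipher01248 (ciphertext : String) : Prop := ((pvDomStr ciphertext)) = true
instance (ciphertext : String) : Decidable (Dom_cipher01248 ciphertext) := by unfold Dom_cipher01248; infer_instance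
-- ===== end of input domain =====

-- B replaces A's split-then-nested-loops by a single pass with a running group sum (objective: simpler, one traversal, no intermediate list).

-- int(ch) for a one-character string; .getD 0 is unreachable under Pre_ (Python raises ValueError there)
def pvDigit (c : Char) : Int := (PySem.Int.ofChars? [c]).getD 0

-- ===== PORT A =====
def cipher01248 (ciphertext : String) : String :=
  -- ciphertext = ciphertext.split("0")   (split? is none only for sep = ""; sep is "0" here)
  let groups : List String := (PySem.Str.split? ciphertext "0").getD []
  -- for i in range(0, len(groups)): sub_sum = 0; for j in range(0, len(groups[i])): sub_sum += int(groups[i][j]); plaintext += chr(sub_sum + 64)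
  -- chr(n) ported by hand as Char.ofNat n.toNat: exact for codes 0 ≤ n < 0xD800 (always the case on Pre_-admitted realistic inputs)
  String.ofList <|
    (PySem.List.pyRange 0 (PySem.List.len groups) 1).foldl (fun plaintext i =>
      let g := PySem.List.pyGetD groups i ""
      let subSum := (PySem.List.pyRange 0 (PySem.List.len g.toList) 1).foldl
        (fun s j => s + pvDigit (PySem.List.pyGetD g.toList j ' ')) 0
      plaintext ++ [Char.ofNat (subSum + 64).toNat]) []

-- ===== PORT B =====
def cipher01248_alt (ciphertext : String) : String :=
  -- one pass: on '0' emit chr(sub_sum+64) and reset, otherwise add the digit; trailing emit after the loop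
  let st := ciphertext.toList.foldl (fun (st : List Char × Int) ch =>
    if ch = '0' then (st.1 ++ [Char.ofNat (st.2 + 64).toNat], 0)
    else (st.1, st.2 + pvDigit ch)) ([], 0)
  String.ofList (st.1 ++ [Char.ofNat (st.2 + 64).toNat])

-- ===== PRECONDITION & SPEC =====
-- Pre_ excludes exactly the inputs containing a non-digit character, on which Python A raises ValueError (int() of a non-digit).
def Pre_cipher01248 (ciphertext : String) : Prop := ciphertext.toList.all PySem.Chars.isdigit = true
instance (ciphertext : String) : Decidable (Pre_cipher01248 ciphertext) := by unfold Pre_cipher01248; infer_instance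
def pvWitness_cipher01248 : String := "120418"
def Spec_cipher01248 (ciphertext : String) (out : String) : Prop := out = cipher01248_alt ciphertext
instance (ciphertext : String) (out : String) : Decidable (Spec_cipher01248 ciphertext out) := by unfold Spec_cipher01248; infer_instance

-- ===== CLAIM (what is proved, stated in full; the proofs are below) =====
def Claim_equal_cipher01248 : Prop := ∀ (ciphertext : String), Dom_cipher01248 ciphertext → Pre_cipher01248 ciphertext → Spec_cipher01248 ciphertext (cipher01248 ciphertext)

-- ===== LEMMAS AND PROOFS =====

def pvEmit (s : Int) : Char := Char.ofNat (s + 64).toNat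
def pvSum (g : List Char) : Int := (g.map pvDigit).sum

-- structural version of str.split("0")
def pvSp : List Char → List (List Char)
  | [] => [[]]
  | c :: cs =>
    if c = '0' then [] :: pvSp cs
    else
      match pvSp cs with
      | g :: gs => (c :: g) :: gs
      | [] => [[c]]

theorem pvSp_ne_nil (cs : List Char) : pvSp cs ≠ [] := by
  cases cs with
  | nil => simp [pvSp]
  | cons c cs =>
    simp only [pvSp]
    split_ifs
    · simp
    · cases h : pvSp cs <;> simp

theorem pvGo_eq : ∀ (fuel : Nat) (l cur : List Char) (acc : List (List Char)), l.length ≤ fuel →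
    PySem.Chars.splitOn.go ['0'] fuel l cur acc =
      acc.reverse ++ (match pvSp l with
        | g :: gs => (cur.reverse ++ g) :: gs
        | [] => []) := by
  intro fuel
  induction fuel with
  | zero =>
    intro l cur acc h
    have : l = [] := List.length_eq_zero_iff.mp (Nat.le_zero.mp h)
    subst this
    simp [PySem.Chars.splitOn.go, pvSp]
  | succ f ih =>
    intro l cur acc h
    cases l with
    | nil => simp [PySem.Chars.splitOn.go, pvSp]
    | cons c rest =>
      by_cases hc : c = '0'
      · subst hc
        have hpre : List.isPrefixOf ['0'] ('0' :: rest) = true := by simp [List.isPrefixOf]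
        rw [show PySem.Chars.splitOn.go ['0'] (f+1) ('0' :: rest) cur acc =
              PySem.Chars.splitOn.go ['0'] f (List.drop 1 ('0' :: rest)) [] (cur.reverse :: acc) from by
            simp [PySem.Chars.splitOn.go, hpre]]
        rw [ih _ _ _ (by simpa using Nat.le_of_succ_le_succ h)]
        cases hsp : pvSp rest with
        | nil => exact absurd hsp (pvSp_ne_nil rest)
        | cons g gs => simp [pvSp, hsp]
      · have hpre : List.isPrefixOf ['0'] (c :: rest) = false := by
          simp [List.isPrefixOf]; exact fun hh => hc hh.symm
        rw [show PySem.Chars.splitOn.go ['0'] (f+1) (c :: rest) cur acc =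
              PySem.Chars.splitOn.go ['0'] f rest (c :: cur) acc from by
            simp [PySem.Chars.splitOn.go, hpre]]
        rw [ih _ _ _ (by simpa using Nat.le_of_succ_le_succ h)]
        cases hsp : pvSp rest with
        | nil => exact absurd hsp (pvSp_ne_nil rest)
        | cons g gs => simp [pvSp, hc, hsp]

theorem pvSplitOn_eq (cs : List Char) : PySem.Chars.splitOn cs ['0'] = pvSp cs := by
  rw [PySem.Chars.splitOn, pvGo_eq (cs.length + 1) cs [] [] (by omega)]
  cases hsp : pvSp cs with
  | nil => exact absurd hsp (pvSp_ne_nil cs)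
  | cons g gs => simp

theorem cipher01248_eq (t : String) :
    cipher01248 t = String.ofList ((pvSp t.toList).map (fun g => pvEmit (pvSum g))) := by
  obtain ⟨gs, hgs, hmap⟩ : ∃ gs, PySem.Str.split? t "0" = some gs ∧ gs.map String.toList = pvSp t.toList := by
    have h := PySem.Str.split?_map t "0"
    cases hs : PySem.Str.split? t "0" with
    | none =>
      rw [hs] at h
      simp [PySem.Chars.split?] at h
    | some gs =>
      rw [hs] at h
      refine ⟨gs, rfl, ?_⟩
      simpa [PySem.Chars.split?, pvSplitOn_eq, show ("0" : String).toList = ['0'] from rfl] using h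
  unfold cipher01248
  rw [hgs]
  simp only [Option.getD_some]
  rw [PySem.List.foldl_pyRange_zero_pyGetD gs ""
        (fun plaintext g => plaintext ++ [Char.ofNat
          (((PySem.List.pyRange 0 (PySem.List.len g.toList) 1).foldl
            (fun s j => s + pvDigit (PySem.List.pyGetD g.toList j ' ')) 0) + 64).toNat]) []]
  have hin : ∀ g : String,
      (PySem.List.pyRange 0 (PySem.List.len g.toList) 1).foldl
        (fun s j => s + pvDigit (PySem.List.pyGetD g.toList j ' ')) 0 = pvSum g.toList := by
    intro g
    rw [PySem.List.foldl_pyRange_zero_pyGetD g.toList ' ' (fun s c => s + pvDigit c) 0,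
        PySem.List.foldl_add]
    simp [pvSum]
  simp only [hin]
  rw [PySem.List.foldl_append_singleton_eq_map (fun g : String => Char.ofNat (pvSum g.toList + 64).toNat) gs []]
  rw [← hmap]
  simp [pvEmit, Function.comp_def]

theorem pvB_main (cs : List Char) : ∀ (acc : List Char) (s : Int),
    (cs.foldl (fun (st : List Char × Int) ch =>
        if ch = '0' then (st.1 ++ [Char.ofNat (st.2 + 64).toNat], 0)
        else (st.1, st.2 + pvDigit ch)) (acc, s)).1 ++
      [Char.ofNat ((cs.foldl (fun (st : List Char × Int) ch =>
        if ch = '0' then (st.1 ++ [Char.ofNat (st.2 + 64).toNat], 0)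
        else (st.1, st.2 + pvDigit ch)) (acc, s)).2 + 64).toNat] =
    acc ++ (match pvSp cs with
      | g :: gs => pvEmit (s + pvSum g) :: gs.map (fun g => pvEmit (pvSum g))
      | [] => []) := by
  induction cs with
  | nil => intro acc s; simp [pvSp, pvEmit, pvSum]
  | cons c cs ih =>
    intro acc s
    by_cases hc : c = '0'
    · subst hc
      simp only [List.foldl_cons, if_true]
      rw [ih (acc ++ [Char.ofNat (s + 64).toNat]) 0]
      cases hsp : pvSp cs with
      | nil => exact absurd hsp (pvSp_ne_nil cs)
      | cons g gs => simp [pvSp, hsp, pvEmit, pvSum]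
    · simp only [List.foldl_cons, if_neg hc]
      rw [ih acc (s + pvDigit c)]
      cases hsp : pvSp cs with
      | nil => exact absurd hsp (pvSp_ne_nil cs)
      | cons g gs =>
        simp [pvSp, hc, hsp, pvSum, add_assoc]

theorem cipher01248_alt_eq (t : String) :
    cipher01248_alt t = String.ofList ((pvSp t.toList).map (fun g => pvEmit (pvSum g))) := by
  unfold cipher01248_alt
  dsimp only
  rw [pvB_main t.toList [] 0]
  cases hsp : pvSp t.toList with
  | nil => exact absurd hsp (pvSp_ne_nil t.toList)
  | cons g gs => simp

-- ===== VERDICT (by name: the statement is the Claim_ definition above) =====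
theorem cipher01248_spec : Claim_equal_cipher01248 := by
  intro t _ _
  unfold Spec_cipher01248
  rw [cipher01248_eq, cipher01248_alt_eq]
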